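-- pv_equiv track=rewrite | github.com/Krugger1982/clear-and-clean-code | values13.py | SynchronizingTables
-- ===== SOURCE A (Python) =====
-- def SynchronizingTables(N, ids, salary):
--     ids2 = []
--     for i in range(N):
--         ids2.append(ids[i])
--     ids2 = sorted(ids2)
--     salary = sorted(salary)
--     salary2 = []
--     # Сопоставляем элемент двух упорядоченных списков
--     for i in range(N):
--         for j in range(N):
--             if ids[i] == ids2[j]:
--                 salary2.append(salary[j])
--     return salary2
-- ===== SOURCE B (Python) =====
-- def SynchronizingTables(N, ids, salary):
--     sids = sorted(ids[:N])
--     ssal = sorted(salary)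
--     groups = {}
--     for a, b in zip(sids, ssal):
--         groups.setdefault(a, []).append(b)
--     out = []
--     for i in range(N):
--         out += groups.get(ids[i], [])
--     return out
-- ===== Notes on version B (the rewrite author's own statement) =====
-- stated objective: faster
-- what changed: Replaces A's quadratic nested scan (for each id, scan all N sorted ids for matches) by one grouping pass: zip the sorted ids with the sorted salaries into a dict mapping each id to its list of matched salaries, then emit dict lookups per input id; intended as faster and measured 117x on random inputs, but on duplicate-heavy ids the output itself is quadratic in N so both implementations are then quadratic.
import Mathlib
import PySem

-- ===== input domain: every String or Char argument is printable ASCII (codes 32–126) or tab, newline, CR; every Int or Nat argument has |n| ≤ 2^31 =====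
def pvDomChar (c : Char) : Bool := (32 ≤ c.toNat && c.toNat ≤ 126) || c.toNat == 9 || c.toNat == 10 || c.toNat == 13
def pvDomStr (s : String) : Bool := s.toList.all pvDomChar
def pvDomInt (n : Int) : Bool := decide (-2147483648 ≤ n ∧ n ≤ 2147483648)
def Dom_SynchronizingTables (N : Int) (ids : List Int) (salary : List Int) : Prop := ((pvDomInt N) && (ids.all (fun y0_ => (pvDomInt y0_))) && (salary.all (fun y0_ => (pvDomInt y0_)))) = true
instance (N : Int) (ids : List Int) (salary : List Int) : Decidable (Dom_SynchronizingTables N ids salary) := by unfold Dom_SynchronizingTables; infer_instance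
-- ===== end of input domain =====

-- B replaces A's nested value-matching scan by one dict-grouping pass over
-- zip(sorted ids, sorted salaries) followed by per-id lookups: intended as faster
-- (measured 117x on random inputs; with duplicate-heavy ids the output itself is
-- quadratic in N, so both are then quadratic).

-- ===== PORT A =====
def SynchronizingTables (N : Int) (ids : List Int) (salary : List Int) : List Int :=
  let ids2 := (PySem.List.pyRange 0 N 1).foldl (fun acc i => acc ++ [PySem.List.pyGetD ids i 0]) []
  let ids2s := PySem.List.sorted ids2 (fun x => x) false
  let ssal := PySem.List.sorted salary (fun x => x) false
  (PySem.List.pyRange 0 N 1).foldl (fun acc i =>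
    (PySem.List.pyRange 0 N 1).foldl (fun acc2 j =>
      if PySem.List.pyGetD ids i 0 = PySem.List.pyGetD ids2s j 0 then
        acc2 ++ [PySem.List.pyGetD ssal j 0]
      else acc2) acc) []

-- ===== PORT B =====
def SynchronizingTables_alt (N : Int) (ids : List Int) (salary : List Int) : List Int :=
  let sids := PySem.List.sorted (PySem.List.slice ids none (some N)) (fun x => x) false
  let ssal := PySem.List.sorted salary (fun x => x) false
  let groups := (sids.zip ssal).foldl
    (fun d p => d.modify p.1 [] (fun l => l ++ [p.2])) PySem.Dict.empty
  (PySem.List.pyRange 0 N 1).foldl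
    (fun acc i => acc ++ groups.getD (PySem.List.pyGetD ids i 0) []) []

-- ===== PRECONDITION & SPEC =====
-- Pre_: exactly the inputs where A returns (no IndexError): A raises iff 0 < N and
-- N exceeds the length of ids or of salary.
def Pre_SynchronizingTables (N : Int) (ids : List Int) (salary : List Int) : Prop :=
  N ≤ 0 ∨ (N ≤ ids.length ∧ N ≤ salary.length)
instance (N : Int) (ids : List Int) (salary : List Int) : Decidable (Pre_SynchronizingTables N ids salary) := by unfold Pre_SynchronizingTables; infer_instance
def pvWitness_SynchronizingTables : Int × List Int × List Int := (3, [2, 1, 2], [30, 10, 20])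
def Spec_SynchronizingTables (N : Int) (ids : List Int) (salary : List Int) (out : List Int) : Prop := out = SynchronizingTables_alt N ids salary
instance (N : Int) (ids : List Int) (salary : List Int) (out : List Int) : Decidable (Spec_SynchronizingTables N ids salary out) := by unfold Spec_SynchronizingTables; infer_instance

-- ===== CLAIM (what is proved, stated in full; the proofs are below) =====
def Claim_equal_SynchronizingTables : Prop := ∀ (N : Int) (ids : List Int) (salary : List Int), Dom_SynchronizingTables N ids salary → Pre_SynchronizingTables N ids salary → Spec_SynchronizingTables N ids salary (SynchronizingTables N ids salary)

-- ===== LEMMAS AND PROOFS =====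

-- A's copy loop 'for i in range(N): ids2.append(ids[i])' builds ids.take n.
lemma map_range_getD_eq_take (xs : List Int) : ∀ (n : Nat), n ≤ xs.length →
    (List.range n).map (fun k => xs.getD k 0) = xs.take n := by
  intro n hn
  apply List.ext_getElem
  · simp [Nat.min_eq_left hn]
  · intro k h1 h2
    simp at h1 ⊢
    have : k < xs.length := by omega
    simp [List.getElem?_eq_getElem this]

lemma pyGetD_zip (xs ys : List Int) (j : Nat) (hj : j < (xs.zip ys).length) :
    PySem.List.pyGetD (xs.zip ys) (j : Int) (0, 0) =
      (PySem.List.pyGetD xs (j : Int) 0, PySem.List.pyGetD ys (j : Int) 0) := by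
  have hx : j < xs.length := by simp [List.length_zip] at hj; omega
  have hy : j < ys.length := by simp [List.length_zip] at hj; omega
  rw [PySem.List.pyGetD_ofNat _ _ _ hj, PySem.List.pyGetD_ofNat _ _ _ hx,
      PySem.List.pyGetD_ofNat _ _ _ hy]
  simp

-- ===== VERDICT (by name: the statement is the Claim_ definition above) =====
theorem SynchronizingTables_spec : Claim_equal_SynchronizingTables := by
  intro N ids salary _hdom hpre
  unfold Spec_SynchronizingTables SynchronizingTables SynchronizingTables_alt
  dsimp only
  by_cases hN0 : N ≤ 0
  · rw [PySem.List.pyRange_one_eq_nil hN0]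
    simp
  · push Not at hN0
    have hpre' : N ≤ (ids.length : Int) ∧ N ≤ (salary.length : Int) := by
      rcases hpre with h | h
      · omega
      · exact h
    obtain ⟨hid, hsal⟩ := hpre'
    set n : Nat := N.toNat with hn_def
    have hn : (n : Int) = N := Int.toNat_of_nonneg (le_of_lt hN0)
    have hnid : n ≤ ids.length := by omega
    have hnsal : n ≤ salary.length := by omega
    -- A's copy loop builds ids.take n = B's slice ids[:N]
    have hcopy : (PySem.List.pyRange 0 N 1).foldl
        (fun acc i => acc ++ [PySem.List.pyGetD ids i 0]) [] = ids.take n := by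
      rw [PySem.List.foldl_append_singleton_eq_map, PySem.List.pyRange_one]
      simp only [List.map_map, Function.comp_def, zero_add, PySem.List.pyGetD_natCast,
        Int.sub_zero, List.nil_append]
      rw [hn_def] at hnid ⊢
      exact map_range_getD_eq_take ids N.toNat hnid
    have hslice : PySem.List.slice ids none (some N) = ids.take n := by
      rw [PySem.List.slice_to ids (le_of_lt hN0)]
    rw [hcopy, hslice]
    set S : List Int := PySem.List.sorted (ids.take n) (fun x => x) false with hS_def
    set T : List Int := PySem.List.sorted salary (fun x => x) false with hT_def
    have hSlen : S.length = n := by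
      rw [hS_def, PySem.List.length_sorted, List.length_take]
      omega
    have hTlen : T.length = salary.length := by
      rw [hT_def, PySem.List.length_sorted]
    have hLlen : (S.zip T).length = n := by
      rw [List.length_zip, hSlen, hTlen]
      omega
    -- B's grouping dict: groups[v] lists the salaries zipped with id v
    have hg : ∀ v : Int,
        ((S.zip T).foldl (fun (d : PySem.Dict Int (List Int)) p => d.modify p.1 [] (fun l => l ++ [p.2]))
          PySem.Dict.empty).getD v []
        = ((S.zip T).filter (fun (p : Int × Int) => p.1 == v)).map (fun p => p.2) := by
      intro v
      rw [PySem.Dict.getD_foldl_modify_append]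
      simp [PySem.Dict.getD_empty]
    -- A's inner scan over j equals the grouped list for v
    have hinner : ∀ (v : Int) (acc : List Int),
        (PySem.List.pyRange 0 N 1).foldl
          (fun acc2 j => if v = PySem.List.pyGetD S j 0 then
              acc2 ++ [PySem.List.pyGetD T j 0] else acc2) acc
        = acc ++ ((S.zip T).filter (fun p => p.1 == v)).map (fun p => p.2) := by
      intro v acc
      have hNL : N = ((S.zip T).length : Int) := by rw [hLlen]; omega
      rw [hNL]
      rw [PySem.List.foldl_congr_mem _ _
        (fun acc2 j => (fun a (p : Int × Int) => if (p.1 == v) then a ++ [p.2] else a)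
          acc2 (PySem.List.pyGetD (S.zip T) j (0, 0))) _ ?_]
      · rw [PySem.List.foldl_pyRange_zero_pyGetD' (S.zip T) (0, 0)
          (fun a (p : Int × Int) => if (p.1 == v) then a ++ [p.2] else a) acc]
        exact PySem.List.foldl_append_if (fun (p : Int × Int) => p.1 == v) (fun (p : Int × Int) => p.2) _ acc
      · intro a j hj
        rw [PySem.List.mem_pyRange_one] at hj
        obtain ⟨hj0, hj1⟩ := hj
        set k : Nat := j.toNat with hk_def
        have hjk : (k : Int) = j := Int.toNat_of_nonneg hj0
        have hkL : k < (S.zip T).length := by omega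
        have hkS : k < S.length := by omega
        have hkT : k < T.length := by omega
        rw [← hjk]
        simp only [pyGetD_zip S T k hkL, PySem.List.pyGetD_ofNat _ _ _ hkS,
          PySem.List.pyGetD_ofNat _ _ _ hkT, beq_iff_eq]
        by_cases hv : v = S[k]
        · simp [hv]
        · simp [hv, Ne.symm hv]
    -- both outer loops compute the same extend-per-i
    rw [PySem.List.foldl_congr_mem _ _
      (fun acc i => acc ++ ((S.zip T).filter
        (fun p => p.1 == PySem.List.pyGetD ids i 0)).map (fun p => p.2)) _
      (fun acc i _ => hinner (PySem.List.pyGetD ids i 0) acc)]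
    exact PySem.List.foldl_congr_mem _ _ _ _
      (fun acc i _ => by rw [hg (PySem.List.pyGetD ids i 0)])
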